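-- pv_equiv track=rewrite | github.com/luisflaviomf/SourceAddonOptimizer | worker/worker_main.py | _extract_default_mesh_tokens_from_qc
-- ===== SOURCE A (Python) =====
-- def _strip_comments(line: str) -> str:
--     if "//" in line:
--         return line.split("//", 1)[0]
--     return line
--
-- def _extract_mesh_token_from_line(line: str) -> str | None:
--     toks = line.replace("\t", " ").split()
--     for t in reversed(toks):
--         tt = t.strip().strip('"').strip()
--         if tt.lower().endswith((".smd", ".dmx")):
--             return tt
--     for t in reversed(toks):
--         tt = t.strip().strip('"').strip()
--         low = tt.lower()
--         if not tt:
--             continue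
--         if low in ("studio", "blank"):
--             continue
--         if low.startswith("$"):
--             continue
--         return tt
--     return None
--
-- def _extract_default_mesh_tokens_from_qc(qc_text: str) -> list[str]:
--     refs = []
--     in_bodygroup = False
--     bodygroup_refs: list[str] = []
--     brace_depth = 0
--
--     for raw in qc_text.splitlines():
--         line = _strip_comments(raw).strip()
--         if not line:
--             continue
--         low = line.lower()
--         if low.startswith("$sequence"):
--             continue
--         if low.startswith("$bodygroup"):
--             in_bodygroup = True
--             bodygroup_refs = []
--             brace_depth = line.count("{") - line.count("}")
--             continue
--         if in_bodygroup:
--             brace_depth += line.count("{") - line.count("}")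
--             if "studio" in low:
--                 token = _extract_mesh_token_from_line(line)
--                 if token:
--                     bodygroup_refs.append(token)
--             if brace_depth <= 0 or "}" in line:
--                 if bodygroup_refs:
--                     refs.append(bodygroup_refs[0])
--                 in_bodygroup = False
--                 bodygroup_refs = []
--                 brace_depth = 0
--             continue
--         if low.startswith("$body") or low.startswith("$model"):
--             token = _extract_mesh_token_from_line(line)
--             if token:
--                 refs.append(token)
--             continue
--
--     seen = set()
--     out = []
--     for r in refs:
--         key = r.lower()
--         if key in seen:
--             continue
--         seen.add(key)
--         out.append(r)
--     return out
-- ===== SOURCE B (Python) =====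
-- def _strip_comments(line: str) -> str:
--     if "//" in line:
--         return line.split("//", 1)[0]
--     return line
--
-- def _extract_mesh_token_from_line(line: str) -> str | None:
--     toks = line.replace("\t", " ").split()
--     for t in reversed(toks):
--         tt = t.strip().strip('"').strip()
--         if tt.lower().endswith((".smd", ".dmx")):
--             return tt
--     for t in reversed(toks):
--         tt = t.strip().strip('"').strip()
--         low = tt.lower()
--         if not tt:
--             continue
--         if low in ("studio", "blank"):
--             continue
--         if low.startswith("$"):
--             continue
--         return tt
--     return None
--
-- def _extract_default_mesh_tokens_from_qc(qc_text: str) -> list[str]: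
--     lines = [l for l in (_strip_comments(r).strip() for r in qc_text.splitlines()) if l]
--     refs = []
--     i = 0
--     n = len(lines)
--     while i < n:
--         line = lines[i]
--         low = line.lower()
--         i += 1
--         if low.startswith("$sequence"):
--             continue
--         if low.startswith("$bodygroup"):
--             brace_depth = line.count("{") - line.count("}")
--             found = None
--             while i < n:
--                 inner = lines[i]
--                 ilow = inner.lower()
--                 i += 1
--                 if ilow.startswith("$sequence"):
--                     continue
--                 if ilow.startswith("$bodygroup"):
--                     brace_depth = inner.count("{") - inner.count("}")
--                     found = None
--                     continue
--                 brace_depth += inner.count("{") - inner.count("}")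
--                 if found is None and "studio" in ilow:
--                     found = _extract_mesh_token_from_line(inner)
--                 if brace_depth <= 0 or "}" in inner:
--                     if found is not None:
--                         refs.append(found)
--                     break
--             continue
--         if low.startswith("$body") or low.startswith("$model"):
--             token = _extract_mesh_token_from_line(line)
--             if token:
--                 refs.append(token)
--
--     seen = set()
--     out = []
--     for r in refs:
--         key = r.lower()
--         if key in seen:
--             continue
--         seen.add(key)
--         out.append(r)
--     return out
-- ===== Notes on version B (the rewrite author's own statement) =====
-- stated objective: alternative
-- what changed: Replaces A's single fold with flag/brace-depth/refs-list state threaded across every line by a precomputed cleaned-line list scanned with an explicit index and an inner while-loop that consumes a whole $bodygroup block, tracking only the first captured token instead of a token list.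
import Mathlib
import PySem

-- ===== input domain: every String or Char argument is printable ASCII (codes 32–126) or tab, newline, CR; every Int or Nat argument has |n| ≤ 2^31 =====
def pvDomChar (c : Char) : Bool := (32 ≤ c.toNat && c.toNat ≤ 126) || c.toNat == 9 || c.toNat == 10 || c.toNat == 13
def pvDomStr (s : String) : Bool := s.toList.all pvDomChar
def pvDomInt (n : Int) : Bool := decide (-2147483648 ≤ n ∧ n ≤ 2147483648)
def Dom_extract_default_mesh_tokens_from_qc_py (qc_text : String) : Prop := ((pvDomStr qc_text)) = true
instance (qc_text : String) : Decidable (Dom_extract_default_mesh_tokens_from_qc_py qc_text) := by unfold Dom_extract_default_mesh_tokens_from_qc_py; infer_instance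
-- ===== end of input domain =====

-- B restructures A's single flag-driven state machine into an explicit line list with an
-- inner block-consuming loop (same cost; objective: alternative decomposition).

-- ===== PORT A =====
-- shared line-level helpers (identical helper functions in Source A and Source B)

-- _strip_comments
def pvStripComments (line : List Char) : List Char :=
  if PySem.Chars.isIn ['/', '/'] line then
    ((PySem.Chars.splitMax? line ['/', '/'] 1).getD []).headD []
  else line

-- t.strip().strip('"').strip()
def pvCleanTok (t : List Char) : List Char :=
  PySem.Chars.strip (PySem.Chars.stripChars (PySem.Chars.strip t) ['"'])

-- first reversed-scan of _extract_mesh_token_from_line (".smd"/".dmx" endings)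
def pvFindSmd : List (List Char) → Option (List Char)
  | [] => none
  | t :: ts =>
    let tt := pvCleanTok t
    if PySem.Chars.endswith (PySem.Chars.lower tt) ['.', 's', 'm', 'd'] ||
       PySem.Chars.endswith (PySem.Chars.lower tt) ['.', 'd', 'm', 'x'] then some tt
    else pvFindSmd ts

-- second reversed-scan of _extract_mesh_token_from_line
def pvFindOther : List (List Char) → Option (List Char)
  | [] => none
  | t :: ts =>
    let tt := pvCleanTok t
    let low := PySem.Chars.lower tt
    if tt = [] then pvFindOther ts
    else if low = ['s','t','u','d','i','o'] || low = ['b','l','a','n','k'] then pvFindOther ts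
    else if PySem.Chars.startswith low ['$'] then pvFindOther ts
    else some tt

-- _extract_mesh_token_from_line
def pvExtractTok (line : List Char) : Option (List Char) :=
  match pvFindSmd (PySem.Chars.split₀ (PySem.Chars.replace line ['\t'] [' '])).reverse with
  | some tt => some tt
  | none => pvFindOther (PySem.Chars.split₀ (PySem.Chars.replace line ['\t'] [' '])).reverse

-- line.count("{") - line.count("}")
def pvBraces (line : List Char) : Int :=
  (PySem.Chars.count line ['{'] : Int) - (PySem.Chars.count line ['}'] : Int)

-- the final lowercase-key dedup pass (identical in Source A and Source B)
def pvDedup : List (List Char) → PySem.Set (List Char) → List (List Char) → List (List Char)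
  | [], _, out => out
  | r :: rs, seen, out =>
    let key := PySem.Chars.lower r
    if seen.contains key then pvDedup rs seen out
    else pvDedup rs (seen.add key) (out ++ [r])

-- the body of A's for-loop on an already stripped, comment-free, nonempty line
def pvStepA (st : List (List Char) × Bool × List (List Char) × Int) (line : List Char) :
    List (List Char) × Bool × List (List Char) × Int :=
  let low := PySem.Chars.lower line
  if PySem.Chars.startswith low ['$','s','e','q','u','e','n','c','e'] then st
  else if PySem.Chars.startswith low ['$','b','o','d','y','g','r','o','u','p'] then
    (st.1, true, [], pvBraces line)
  else if st.2.1 then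
    let d := st.2.2.2 + pvBraces line
    let brs :=
      if PySem.Chars.isIn ['s','t','u','d','i','o'] low then
        match pvExtractTok line with
        | some t => if t ≠ [] then st.2.2.1 ++ [t] else st.2.2.1
        | none => st.2.2.1
      else st.2.2.1
    if d ≤ 0 || PySem.Chars.isIn ['}'] line then
      ((match brs with | [] => st.1 | t :: _ => st.1 ++ [t]), false, [], 0)
    else (st.1, true, brs, d)
  else if PySem.Chars.startswith low ['$','b','o','d','y'] ||
          PySem.Chars.startswith low ['$','m','o','d','e','l'] then
    ((match pvExtractTok line with
      | some t => if t ≠ [] then st.1 ++ [t] else st.1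
      | none => st.1), st.2)
  else st

-- A's loop body on a raw line: strip comments, strip, skip empties
def pvStepARaw (st : List (List Char) × Bool × List (List Char) × Int) (raw : List Char) :
    List (List Char) × Bool × List (List Char) × Int :=
  let line := PySem.Chars.strip (pvStripComments raw)
  if line = [] then st else pvStepA st line

def extract_default_mesh_tokens_from_qc_py (qc_text : String) : List String :=
  (pvDedup ((PySem.Chars.splitlines qc_text.toList).foldl pvStepARaw ([], false, [], 0)).1
    PySem.Set.empty []).map String.ofList

-- ===== PORT B =====
-- B's inner while-loop: consume lines of a bodygroup block; returns the captured token
-- (if the block was closed) and the remaining lines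
def pvConsume : List (List Char) → Int → Option (List Char) → Option (List Char) × List (List Char)
  | [], _, _ => (none, [])
  | l :: ls, d, f =>
    let low := PySem.Chars.lower l
    if PySem.Chars.startswith low ['$','s','e','q','u','e','n','c','e'] then pvConsume ls d f
    else if PySem.Chars.startswith low ['$','b','o','d','y','g','r','o','u','p'] then
      pvConsume ls (pvBraces l) none
    else
      let d' := d + pvBraces l
      let f' := match f with
        | some t => some t
        | none => if PySem.Chars.isIn ['s','t','u','d','i','o'] low then pvExtractTok l else none
      if d' ≤ 0 || PySem.Chars.isIn ['}'] l then (f', ls) else pvConsume ls d' f'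

theorem pvConsume_len : ∀ (ls : List (List Char)) (d : Int) (f : Option (List Char)),
    (pvConsume ls d f).2.length ≤ ls.length := by
  intro ls
  induction ls with
  | nil => intro d f; simp [pvConsume]
  | cons l ls ih =>
    intro d f
    simp only [pvConsume]
    split
    · exact le_trans (ih _ _) (Nat.le_succ _)
    · split
      · exact le_trans (ih _ _) (Nat.le_succ _)
      · split
        · exact Nat.le_succ _
        · exact le_trans (ih _ _) (Nat.le_succ _)

-- B's outer index loop, as structural recursion over the line list
def pvCollectB : List (List Char) → List (List Char)
  | [] => []
  | l :: ls =>
    let low := PySem.Chars.lower l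
    if PySem.Chars.startswith low ['$','s','e','q','u','e','n','c','e'] then pvCollectB ls
    else if PySem.Chars.startswith low ['$','b','o','d','y','g','r','o','u','p'] then
      let r := pvConsume ls (pvBraces l) none
      (match r.1 with | some t => [t] | none => []) ++ pvCollectB r.2
    else if PySem.Chars.startswith low ['$','b','o','d','y'] ||
            PySem.Chars.startswith low ['$','m','o','d','e','l'] then
      (match pvExtractTok l with
       | some t => if t ≠ [] then [t] else []
       | none => []) ++ pvCollectB ls
    else pvCollectB ls
termination_by ls => ls.length
decreasing_by
  all_goals first
    | exact Nat.lt_succ_of_le (pvConsume_len ls (pvBraces l) none)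
    | (simp; try omega)

def extract_default_mesh_tokens_from_qc_py_alt (qc_text : String) : List String :=
  (pvDedup (pvCollectB (((PySem.Chars.splitlines qc_text.toList).map
      (fun r => PySem.Chars.strip (pvStripComments r))).filter (· ≠ [])))
    PySem.Set.empty []).map String.ofList

-- ===== PRECONDITION & SPEC =====
def Spec_extract_default_mesh_tokens_from_qc_py (qc_text : String) (out : List String) : Prop := out = extract_default_mesh_tokens_from_qc_py_alt qc_text
instance (qc_text : String) (out : List String) : Decidable (Spec_extract_default_mesh_tokens_from_qc_py qc_text out) := by unfold Spec_extract_default_mesh_tokens_from_qc_py; infer_instance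

-- ===== CLAIM (what is proved, stated in full; the proofs are below) =====
def Claim_equal_extract_default_mesh_tokens_from_qc_py : Prop := ∀ (qc_text : String), Dom_extract_default_mesh_tokens_from_qc_py qc_text → Spec_extract_default_mesh_tokens_from_qc_py qc_text (extract_default_mesh_tokens_from_qc_py qc_text)

-- ===== LEMMAS AND PROOFS =====

-- the ".smd"/".dmx" scan never returns the empty token
theorem pvFindSmd_ne_nil : ∀ ts, pvFindSmd ts ≠ some [] := by
  intro ts
  induction ts with
  | nil => simp [pvFindSmd]
  | cons t ts ih =>
    simp only [pvFindSmd]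
    split
    · rename_i h
      intro hc
      injection hc with hc
      rw [hc] at h
      revert h
      decide
    · exact ih

theorem pvFindOther_ne_nil : ∀ ts, pvFindOther ts ≠ some [] := by
  intro ts
  induction ts with
  | nil => simp [pvFindOther]
  | cons t ts ih =>
    simp only [pvFindOther]
    split
    · exact ih
    · split
      · exact ih
      · split
        · exact ih
        · rename_i h _ _
          intro hc
          injection hc with hc
          exact h hc

theorem pvExtractTok_ne_nil (line : List Char) : pvExtractTok line ≠ some [] := by
  unfold pvExtractTok
  cases h : pvFindSmd (PySem.Chars.split₀ (PySem.Chars.replace line ['\t'] [' '])).reverse with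
  | none => simpa [h] using pvFindOther_ne_nil _
  | some t =>
    intro hc
    injection hc with hc
    exact pvFindSmd_ne_nil _ (hc ▸ h)

-- raw fold = fold over the stripped, comment-free, nonempty lines
theorem pvFold_filter : ∀ (raws : List (List Char)) st,
    raws.foldl pvStepARaw st =
      ((raws.map (fun r => PySem.Chars.strip (pvStripComments r))).filter (· ≠ [])).foldl pvStepA st := by
  intro raws
  induction raws with
  | nil => intro st; rfl
  | cons r rs ih =>
    intro st
    by_cases h : PySem.Chars.strip (pvStripComments r) = []
    · simp [pvStepARaw, h, ih]
    · simp [pvStepARaw, h, ih]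

-- A's bodygroup_refs tracked only through its head = B's found option
theorem pvBrs_head (l : List Char) (brs : List (List Char)) :
    (if PySem.Chars.isIn ['s','t','u','d','i','o'] (PySem.Chars.lower l) then
        match pvExtractTok l with
        | some t => if t ≠ [] then brs ++ [t] else brs
        | none => brs
      else brs).head? =
    (match brs.head? with
      | some t => some t
      | none =>
        if PySem.Chars.isIn ['s','t','u','d','i','o'] (PySem.Chars.lower l) then pvExtractTok l
        else none) := by
  cases brs with
  | cons b bs =>
    simp only [List.head?_cons]
    by_cases hs : PySem.Chars.isIn ['s','t','u','d','i','o'] (PySem.Chars.lower l) = true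
    · simp only [hs, if_true]
      cases he : pvExtractTok l with
      | none => simp
      | some t => by_cases ht : t = [] <;> simp [ht]
    · simp [hs]
  | nil =>
    cases h : pvExtractTok l with
    | none => simp
    | some t =>
      have ht : t ≠ [] := fun hc => pvExtractTok_ne_nil l (hc ▸ h)
      by_cases hs : PySem.Chars.isIn ['s','t','u','d','i','o'] (PySem.Chars.lower l) = true <;>
        simp [ht, hs]

-- the main correspondence, by strong induction on the number of lines
theorem pvMain : ∀ (n : Nat) (ls : List (List Char)), ls.length ≤ n →
    (∀ refs brs d, (ls.foldl pvStepA (refs, false, brs, d)).1 = refs ++ pvCollectB ls) ∧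
    (∀ refs brs d, (ls.foldl pvStepA (refs, true, brs, d)).1 =
      refs ++ ((pvConsume ls d brs.head?).1.toList) ++ pvCollectB (pvConsume ls d brs.head?).2) := by
  intro n
  induction n with
  | zero =>
    intro ls h
    have hnil : ls = [] := List.eq_nil_of_length_eq_zero (Nat.le_zero.mp h)
    subst hnil
    exact ⟨fun refs brs d => by simp [pvCollectB],
           fun refs brs d => by simp [pvConsume, pvCollectB]⟩
  | succ n ih =>
    intro ls h
    cases ls with
    | nil =>
      exact ⟨fun refs brs d => by simp [pvCollectB],
             fun refs brs d => by simp [pvConsume, pvCollectB]⟩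
    | cons l ls =>
      have hlen : ls.length ≤ n := by
        simp only [List.length_cons] at h; omega
      constructor
      · -- not inside a bodygroup
        intro refs brs d
        simp only [List.foldl_cons]
        by_cases h1 : PySem.Chars.startswith (PySem.Chars.lower l)
            ['$','s','e','q','u','e','n','c','e'] = true
        · simp only [pvStepA, pvCollectB, h1, if_true]
          exact (ih ls hlen).1 refs brs d
        · by_cases h2 : PySem.Chars.startswith (PySem.Chars.lower l)
              ['$','b','o','d','y','g','r','o','u','p'] = true
          · simp only [pvStepA, pvCollectB, h1, h2, if_true, Bool.false_eq_true, if_false]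
            rw [(ih ls hlen).2 refs [] (pvBraces l)]
            simp only [List.head?_nil]
            cases (pvConsume ls (pvBraces l) none).1 <;> simp
          · by_cases h3 : (PySem.Chars.startswith (PySem.Chars.lower l) ['$','b','o','d','y'] ||
                PySem.Chars.startswith (PySem.Chars.lower l) ['$','m','o','d','e','l']) = true
            · simp only [pvStepA, pvCollectB, h1, h2, h3, if_true, Bool.false_eq_true, if_false]
              rw [(ih ls hlen).1 _ brs d]
              cases he : pvExtractTok l with
              | none => simp
              | some t => by_cases ht : t = [] <;> simp [ht]
            · simp only [pvStepA, pvCollectB, h1, h2, h3, Bool.false_eq_true, if_false]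
              exact (ih ls hlen).1 refs brs d
      · -- inside a bodygroup
        intro refs brs d
        simp only [List.foldl_cons]
        by_cases h1 : PySem.Chars.startswith (PySem.Chars.lower l)
            ['$','s','e','q','u','e','n','c','e'] = true
        · simp only [pvStepA, pvConsume, h1, if_true]
          exact (ih ls hlen).2 refs brs d
        · by_cases h2 : PySem.Chars.startswith (PySem.Chars.lower l)
              ['$','b','o','d','y','g','r','o','u','p'] = true
          · simp only [pvStepA, pvConsume, h1, h2, if_true, Bool.false_eq_true, if_false]
            rw [(ih ls hlen).2 refs [] (pvBraces l)]
            simp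
          · simp only [pvStepA, pvConsume, h1, h2, Bool.false_eq_true, if_false, if_true]
            by_cases hc : (d + pvBraces l ≤ 0 || PySem.Chars.isIn ['}'] l) = true
            · simp only [hc, if_true]
              rw [(ih ls hlen).1 _ [] 0]
              rw [← pvBrs_head l brs]
              cases hbrs : (if PySem.Chars.isIn ['s','t','u','d','i','o'] (PySem.Chars.lower l) then
                  match pvExtractTok l with
                  | some t => if t ≠ [] then brs ++ [t] else brs
                  | none => brs
                else brs) <;> simp
            · simp only [hc, Bool.false_eq_true, if_false]
              rw [(ih ls hlen).2 refs _ (d + pvBraces l)]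
              rw [pvBrs_head l brs]

-- ===== VERDICT (by name: the statement is the Claim_ definition above) =====
theorem extract_default_mesh_tokens_from_qc_py_spec : Claim_equal_extract_default_mesh_tokens_from_qc_py := by
  intro qc _
  show _ = _
  unfold extract_default_mesh_tokens_from_qc_py extract_default_mesh_tokens_from_qc_py_alt
  rw [pvFold_filter]
  rw [(pvMain _ _ (le_refl _)).1 [] [] 0]
  rfl
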